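-- pv_equiv track=rewrite | github.com/hehehe47/LeetCode | Pure Storage/kangoroo.py | anton
-- ===== SOURCE A (Python) =====
-- def contains(a, b):
--     c = 0
--     if b in a:
--         return False
--     i, j = 0, 0
--     while i < len(b):
--         while j < len(a):
--             if a[j] == b[i]:
--                 c += 1
--                 j += 1
--                 if c == len(b):
--                     return True
--                 break
--             j += 1
--         i += 1
--
--     return False
--
-- def anton(d):
--     d2 = {}
--     score = 0
--     for k, v in d.items():
--         for i in v:
--
--             if contains(k, i):
--                 score -= 1
--                 if i not in d2:
--                     d2[i] = [k]
--                 else: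
--                     d2[i].append(k)
--     for k, v in d2.items():
--         if len(v) > 1:
--             score -= 1
--
--     return score
-- ===== SOURCE B (Python) =====
-- def contains(a, b):
--     def sub(x, y):
--         if not y:
--             return True
--         if not x:
--             return False
--         return sub(x[1:], y[1:] if x[0] == y[0] else y)
--     return b not in a and sub(a, b)
--
-- def anton(d):
--     matched = [i for k, v in d.items() for i in v if contains(k, i)]
--     seen, dup = set(), set()
--     for i in matched:
--         if i in seen:
--             dup.add(i)
--         else:
--             seen.add(i)
--     return -len(matched) - len(dup)
-- ===== Notes on version B (the rewrite author's own statement) =====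
-- stated objective: alternative
-- what changed: B first builds the flat list of matched items with a comprehension, then detects items matched more than once with a seen/dup pair of sets, and returns -len(matched)-len(dup) arithmetically, replacing A's fused score-updating loop with a dict-of-lists and a trailing length pass; the subsequence test is a head-to-head recursion instead of A's two-index while loops.
import Mathlib
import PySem

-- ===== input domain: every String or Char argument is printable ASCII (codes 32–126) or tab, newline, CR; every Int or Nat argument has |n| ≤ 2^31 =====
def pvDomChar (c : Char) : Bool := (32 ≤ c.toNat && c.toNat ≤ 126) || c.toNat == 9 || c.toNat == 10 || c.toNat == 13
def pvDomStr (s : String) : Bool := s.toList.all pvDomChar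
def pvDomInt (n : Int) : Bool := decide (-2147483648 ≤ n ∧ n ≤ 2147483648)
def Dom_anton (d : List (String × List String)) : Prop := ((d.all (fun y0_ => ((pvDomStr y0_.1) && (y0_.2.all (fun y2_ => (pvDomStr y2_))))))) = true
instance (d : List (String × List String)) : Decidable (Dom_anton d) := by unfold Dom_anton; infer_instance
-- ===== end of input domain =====

-- B is staged differently: it first collects the flat list of matched items with a
-- comprehension, then finds the items matched more than once with a seen/dup pair of sets,
-- and returns -len(matched) - len(dup); the subsequence test is a head-to-head recursion.
-- Objective: alternative (same cost, different decomposition).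
-- Both ports first build the PySem.Dict from the association list, mirroring the Python
-- calling convention (the argument is a dict: duplicate keys overwrite in place).

-- ===== PORT A =====
-- inner `while j < len(a)` loop: scan the rest of a for b[i]; some rest-after-match, none = j hit len(a)
def antonInnerJ (a : List Char) (bi : Char) : Option (List Char) :=
  match a with
  | [] => none
  | x :: xs => if x = bi then some xs else antonInnerJ xs bi

-- outer `while i < len(b)` loop, carrying the match counter c and len(b)
def antonOuter (a : List Char) (b : List Char) (c : Nat) (lenb : Nat) : Bool :=
  match b with
  | [] => false
  | bi :: bt =>
    match antonInnerJ a bi with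
    | some a' => if c + 1 = lenb then true else antonOuter a' bt (c + 1) lenb
    | none => antonOuter [] bt c lenb

def containsA (a b : String) : Bool :=
  if PySem.Str.isIn b a then false
  else antonOuter a.toList b.toList 0 b.toList.length

-- body of the nested `for i in v` loop (score update and d2 update)
def antonBodyA (st : Int × PySem.Dict String (List String)) (k i : String) :
    Int × PySem.Dict String (List String) :=
  if containsA k i then
    (st.1 - 1,
     if st.2.contains i then st.2.modify i [] (· ++ [k]) else st.2.insert i [k])
  else st

-- trailing `for k, v in d2.items()` loop
def antonSecondLoop (st : Int × PySem.Dict String (List String)) : Int :=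
  st.2.items.foldl (fun s p => if p.2.length > 1 then s - 1 else s) st.1

def anton (d : List (String × List String)) : Int :=
  antonSecondLoop
    ((PySem.Dict.ofList d).items.foldl
      (fun st kv => kv.2.foldl (fun st i => antonBodyA st kv.1 i) st)
      (0, PySem.Dict.empty))

-- ===== PORT B =====
-- the recursive helper `sub`: compare heads, always advance x, advance y on a match
def subRec (x y : List Char) : Bool :=
  match y with
  | [] => true
  | yh :: yt =>
    match x with
    | [] => false
    | xh :: xt => subRec xt (if xh = yh then yt else yh :: yt)

-- `b not in a and sub(a, b)`
def containsB (a b : String) : Bool :=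
  !(PySem.Str.isIn b a) && subRec a.toList b.toList

-- `[i for k, v in d.items() for i in v if contains(k, i)]`
def antonMatched (d : List (String × List String)) : List String :=
  (PySem.Dict.ofList d).items.flatMap (fun kv => kv.2.filter (fun i => containsB kv.1 i))

-- the seen/dup loop over the matched list
def antonDupStep (sd : PySem.Set String × PySem.Set String) (i : String) :
    PySem.Set String × PySem.Set String :=
  if PySem.Set.contains sd.1 i then (sd.1, PySem.Set.add sd.2 i)
  else (PySem.Set.add sd.1 i, sd.2)

def anton_alt (d : List (String × List String)) : Int :=
  let matched := antonMatched d
  let sd := matched.foldl antonDupStep (PySem.Set.empty, PySem.Set.empty)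
  Neg.neg (matched.length : Int) - PySem.Set.len sd.2

-- ===== PRECONDITION & SPEC =====
def Spec_anton (d : List (String × List String)) (out : Int) : Prop := out = anton_alt d
instance (d : List (String × List String)) (out : Int) : Decidable (Spec_anton d out) := by unfold Spec_anton; infer_instance

-- ===== CLAIM =====
def Claim_equal_anton : Prop := ∀ (d : List (String × List String)), Dom_anton d → Spec_anton d (anton d)

-- ===== LEMMAS AND PROOFS =====

-- A's contains equals B's contains
theorem subRec_step (a : List Char) (bi : Char) (bt : List Char) :
    subRec a (bi :: bt) =
      (match antonInnerJ a bi with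
       | some a' => subRec a' bt
       | none => false) := by
  induction a with
  | nil => rfl
  | cons x xs ih =>
    by_cases h : x = bi <;> simp [subRec, antonInnerJ, h] <;> simpa using ih

theorem antonOuter_nil (b : List Char) (c lenb : Nat) : antonOuter [] b c lenb = false := by
  induction b generalizing c with
  | nil => rfl
  | cons bi bt ih => simp [antonOuter, antonInnerJ, ih]

theorem antonOuter_eq_subRec (b : List Char) (hb : b ≠ []) :
    ∀ (a : List Char) (c : Nat), antonOuter a b c (c + b.length) = subRec a b := by
  induction b with
  | nil => exact absurd rfl hb
  | cons bi bt ih =>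
    intro a c
    rw [show antonOuter a (bi :: bt) c (c + (bi :: bt).length)
          = (match antonInnerJ a bi with
             | some a' => if c + 1 = c + (bi :: bt).length then true
                          else antonOuter a' bt (c + 1) (c + (bi :: bt).length)
             | none => antonOuter [] bt c (c + (bi :: bt).length)) from rfl,
        subRec_step]
    cases h : antonInnerJ a bi with
    | none => simp [antonOuter_nil]
    | some a' =>
      dsimp only
      cases bt with
      | nil => simp [subRec]
      | cons x xt =>
        rw [if_neg (by simp only [List.length_cons]; omega),
            show c + (bi :: x :: xt).length = (c + 1) + (x :: xt).length from by
              simp only [List.length_cons]; omega]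
        exact ih (by simp) a' (c + 1)

theorem contains_eq (a b : String) : containsA a b = containsB a b := by
  unfold containsA containsB
  by_cases h : PySem.Str.isIn b a = true
  · rw [if_pos h, h, Bool.not_true, Bool.false_and]
  · have h0 : PySem.Str.isIn b a = false := by simpa using h
    have hb : b.toList ≠ [] := by
      intro hnil
      apply h
      have : PySem.Str.isIn b a = PySem.Chars.isIn b.toList a.toList := by
        simp [PySem.Str.isIn]
      rw [this, hnil]
      exact PySem.Chars.isIn_nil a.toList
    have h2 := antonOuter_eq_subRec b.toList hb a.toList 0
    rw [Nat.zero_add] at h2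
    rw [if_neg h, h0, Bool.not_false, Bool.true_and]
    exact h2

-- flatten a nested foldl over (key, list) pairs into a foldl over all (key, item) pairs
theorem foldl_nested_eq_flat {σ : Type} (f : σ → String → String → σ) :
    ∀ (L : List (String × List String)) (st : σ),
      L.foldl (fun st kv => kv.2.foldl (fun st i => f st kv.1 i) st) st
        = (L.flatMap (fun kv => kv.2.map (fun i => (kv.1, i)))).foldl
            (fun st ki => f st ki.1 ki.2) st := by
  intro L
  induction L with
  | nil => intro st; rfl
  | cons kv L ih =>
    intro st
    simp only [List.foldl_cons, List.flatMap_cons, List.foldl_append, ih, List.foldl_map]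

-- A's second pass is a countP
theorem foldl_sub_one_eq_countP (l : List (String × List String)) (s : Int) :
    l.foldl (fun s p => if p.2.length > 1 then s - 1 else s) s
      = s - (l.countP (fun p => decide (p.2.length > 1)) : Int) := by
  induction l generalizing s with
  | nil => simp
  | cons p l ih =>
    by_cases h : p.2.length > 1 <;> simp [h, ih] <;> push_cast <;> ring

-- the common value both programs compute, as a function of the full matched list
def antonScore (m : List String) : Int :=
  -(m.length : Int) - ((PySem.Set.ofList m).countP (fun x => decide (1 < m.count x)) : Int)

-- the matched items contributed by a flat pair list, in order
def matchedOf (P : List (String × String)) : List String :=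
  (P.filter (fun ki => containsA ki.1 ki.2)).map Prod.snd

-- invariant tying A's running state to the matched items seen so far
def InvA (m : List String) (st : Int × PySem.Dict String (List String)) : Prop :=
  st.1 = -(m.length : Int) ∧ st.2.keys.Nodup ∧
  (∀ x, x ∈ st.2.keys ↔ x ∈ m) ∧ (∀ x, (st.2.getD x []).length = m.count x)

theorem antonA_fold (P : List (String × String)) :
    ∀ (m : List String) (st : Int × PySem.Dict String (List String)), InvA m st →
      antonSecondLoop (P.foldl (fun st ki => antonBodyA st ki.1 ki.2) st)
        = antonScore (m ++ matchedOf P) := by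
  induction P with
  | nil =>
    intro m ⟨sA, d2⟩ ⟨hs, hnd, hmem, hcnt⟩
    have hs' : sA = -(m.length : Int) := hs
    simp only [List.foldl_nil, antonSecondLoop, matchedOf, List.filter_nil, List.map_nil,
      List.append_nil]
    rw [foldl_sub_one_eq_countP, PySem.Dict.items_eq_map_keys d2 hnd ([] : List String),
        List.countP_map]
    have hperm : d2.keys.Perm (PySem.Set.ofList m) :=
      (List.perm_ext_iff_of_nodup hnd (PySem.Set.nodup_ofList m)).mpr
        (fun x => by rw [hmem x, PySem.Set.mem_ofList])
    have hcongr : d2.keys.countP ((fun p => decide (p.2.length > 1)) ∘ fun k => (k, d2.getD k []))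
        = d2.keys.countP (fun x => decide (1 < m.count x)) := by
      apply List.countP_congr
      intro x _
      simp [Function.comp, hcnt x]
    rw [hcongr, hperm.countP_eq]
    unfold antonScore
    rw [hs']
  | cons ki P ih =>
    intro m ⟨sA, d2⟩ ⟨hs, hnd, hmem, hcnt⟩
    have hs' : sA = -(m.length : Int) := hs
    obtain ⟨k, i⟩ := ki
    simp only [List.foldl_cons]
    by_cases hc : containsA k i = true
    · have hmatch : matchedOf ((k, i) :: P) = i :: matchedOf P := by
        simp [matchedOf, List.filter_cons, hc]
      rw [hmatch, show m ++ i :: matchedOf P = (m ++ [i]) ++ matchedOf P from by simp]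
      by_cases hin : d2.contains i = true
      · rw [show antonBodyA (sA, d2) (k, i).1 (k, i).2 = (sA - 1, d2.modify i [] (· ++ [k]))
              from by simp [antonBodyA, hc, hin]]
        apply ih
        have hkeys : (d2.modify i [] (· ++ [k])).keys = d2.keys := by
          rw [PySem.Dict.keys_modify, PySem.Dict.keys_insert_of_contains d2 _ hin]
        have himem : i ∈ m := (hmem i).mp ((PySem.Dict.contains_iff_mem_keys d2 i).mp hin)
        refine ⟨by rw [hs']; push_cast [List.length_append, List.length_cons, List.length_nil]; ring,
                by rw [hkeys]; exact hnd, ?_, ?_⟩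
        · intro x
          rw [hkeys, hmem x, List.mem_append, List.mem_singleton]
          constructor
          · exact Or.inl
          · rintro (h | rfl)
            · exact h
            · exact himem
        · intro x
          rw [PySem.Dict.getD_modify]
          by_cases hx : x = i
          · subst hx
            simp [hcnt x, List.count_append, List.count_cons]
          · have hix : (if i = x then 1 else 0) = 0 := if_neg (fun h => hx h.symm)
            simp [hx, hcnt x, List.count_append, List.count_cons, hix]
      · simp only [Bool.not_eq_true] at hin
        rw [show antonBodyA (sA, d2) (k, i).1 (k, i).2 = (sA - 1, d2.insert i [k])
              from by simp [antonBodyA, hc, hin]]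
        apply ih
        have hinotm : i ∉ m := by
          intro hmm
          have h2 := (PySem.Dict.contains_iff_mem_keys d2 i).mpr ((hmem i).mpr hmm)
          rw [hin] at h2
          exact Bool.false_ne_true h2
        refine ⟨by rw [hs']; push_cast [List.length_append, List.length_cons, List.length_nil]; ring,
                PySem.Dict.nodup_keys_insert d2 i [k] hnd, ?_, ?_⟩
        · intro x
          rw [PySem.Dict.mem_keys_insert, hmem x, List.mem_append, List.mem_singleton, or_comm]
        · intro x
          rw [PySem.Dict.getD_insert]
          by_cases hx : x = i
          · subst hx
            simp [List.count_append, List.count_cons, List.count_eq_zero.mpr hinotm]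
          · have hix : (if i = x then 1 else 0) = 0 := if_neg (fun h => hx h.symm)
            simp [hx, hcnt x, List.count_append, List.count_cons, hix]
    · simp only [Bool.not_eq_true] at hc
      rw [show antonBodyA (sA, d2) (k, i).1 (k, i).2 = (sA, d2)
            from by simp [antonBodyA, hc],
          show matchedOf ((k, i) :: P) = matchedOf P from by
            simp [matchedOf, List.filter_cons, hc]]
      exact ih m (sA, d2) ⟨hs, hnd, hmem, hcnt⟩

-- characterisation of B's seen/dup fold
theorem antonDup_fold (m : List String) :
    ∀ (s t : PySem.Set String), s.Nodup → t.Nodup →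
      (m.foldl antonDupStep (s, t)).2.Nodup ∧
      (∀ x, x ∈ (m.foldl antonDupStep (s, t)).2 ↔ x ∈ t ∨ (x ∈ s ∧ x ∈ m) ∨ 1 < m.count x) := by
  induction m with
  | nil =>
    intro s t hs ht
    exact ⟨ht, fun x => by simp⟩
  | cons i m ih =>
    intro s t hs ht
    by_cases hin : i ∈ s
    · have hci : PySem.Set.contains s i = true := by simp [hin]
      have hstep : antonDupStep (s, t) i = (s, PySem.Set.add t i) := by
        unfold antonDupStep
        rw [hci]
        rfl
      rw [List.foldl_cons, hstep]
      obtain ⟨hnd, hiff⟩ := ih s (PySem.Set.add t i) hs (PySem.Set.nodup_add _ _ ht)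
      refine ⟨hnd, fun x => ?_⟩
      rw [hiff x]
      by_cases hx : x = i
      · subst hx
        constructor
        · rintro (h | h | h)
          · rcases (PySem.Set.mem_add _ _ _).mp h with h' | h'
            · exact Or.inl h'
            · exact Or.inr (Or.inl ⟨hin, by simp⟩)
          · exact Or.inr (Or.inl ⟨h.1, List.mem_cons_of_mem _ h.2⟩)
          · refine Or.inr (Or.inr ?_)
            rw [List.count_cons_self]
            omega
        · intro _
          exact Or.inl ((PySem.Set.mem_add _ _ _).mpr (Or.inr rfl))
      · rw [PySem.Set.mem_add]
        have hix : (if i = x then 1 else 0) = 0 := if_neg (fun h => hx h.symm)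
        simp only [List.mem_cons, List.count_cons, hx, beq_iff_eq, hix, Nat.add_zero,
          false_or, or_false]
    · have hci : PySem.Set.contains s i = false := by
        rw [← Bool.not_eq_true]
        intro h
        apply hin
        simpa using h
      have hstep : antonDupStep (s, t) i = (PySem.Set.add s i, t) := by
        unfold antonDupStep
        rw [hci]
        rfl
      rw [List.foldl_cons, hstep]
      obtain ⟨hnd, hiff⟩ := ih (PySem.Set.add s i) t (PySem.Set.nodup_add _ _ hs) ht
      refine ⟨hnd, fun x => ?_⟩
      rw [hiff x]
      by_cases hx : x = i
      · subst hx
        have hadd : x ∈ PySem.Set.add s x := (PySem.Set.mem_add _ _ _).mpr (Or.inr rfl)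
        constructor
        · rintro (h | h | h)
          · exact Or.inl h
          · have hc1 : 0 < m.count x := List.count_pos_iff.mpr h.2
            refine Or.inr (Or.inr ?_)
            rw [List.count_cons_self]
            omega
          · refine Or.inr (Or.inr ?_)
            rw [List.count_cons_self]
            omega
        · rintro (h | h | h)
          · exact Or.inl h
          · exact absurd h.1 hin
          · rw [List.count_cons_self] at h
            have hc1 : 0 < m.count x := by omega
            exact Or.inr (Or.inl ⟨hadd, List.count_pos_iff.mp hc1⟩)
      · rw [PySem.Set.mem_add]
        have hix : (if i = x then 1 else 0) = 0 := if_neg (fun h => hx h.symm)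
        simp only [List.mem_cons, List.count_cons, hx, beq_iff_eq, hix, Nat.add_zero,
          false_or, or_false]
-- B's result as a function of the matched list
theorem antonB_eq_score (m : List String) :
    -(m.length : Int) - PySem.Set.len (m.foldl antonDupStep (PySem.Set.empty, PySem.Set.empty)).2
      = antonScore m := by
  obtain ⟨hnd, hiff⟩ := antonDup_fold m PySem.Set.empty PySem.Set.empty
    List.nodup_nil List.nodup_nil
  have hiff' : ∀ x, x ∈ (m.foldl antonDupStep (PySem.Set.empty, PySem.Set.empty)).2 ↔
      x ∈ (PySem.Set.ofList m).filter (fun x => decide (1 < m.count x)) := by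
    intro x
    rw [hiff x, List.mem_filter, PySem.Set.mem_ofList]
    simp only [PySem.Set.empty, List.not_mem_nil, false_or, false_and, decide_eq_true_eq]
    constructor
    · intro h
      exact ⟨List.count_pos_iff.mp (by omega), h⟩
    · exact fun h => h.2
  have hperm : (m.foldl antonDupStep (PySem.Set.empty, PySem.Set.empty)).2.Perm
      ((PySem.Set.ofList m).filter (fun x => decide (1 < m.count x))) :=
    (List.perm_ext_iff_of_nodup hnd (List.Nodup.filter _ (PySem.Set.nodup_ofList m))).mpr hiff'
  have hlen := hperm.length_eq
  unfold antonScore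
  rw [show PySem.Set.len (m.foldl antonDupStep (PySem.Set.empty, PySem.Set.empty)).2
        = (((m.foldl antonDupStep (PySem.Set.empty, PySem.Set.empty)).2).length : Int) from rfl,
      hlen, List.countP_eq_length_filter]

-- the comprehension's matched list equals the matched items of the flattened pair list
theorem matched_eq (L : List (String × List String)) :
    matchedOf (L.flatMap (fun kv => kv.2.map (fun i => (kv.1, i))))
      = L.flatMap (fun kv => kv.2.filter (fun i => containsB kv.1 i)) := by
  induction L with
  | nil => rfl
  | cons kv L ih =>
    simp only [List.flatMap_cons, matchedOf, List.filter_append, List.map_append] at *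
    rw [ih]
    congr 1
    rw [List.filter_map, List.map_map]
    have hfc : kv.2.filter ((fun ki => containsA ki.1 ki.2) ∘ fun i => (kv.1, i))
        = kv.2.filter (fun i => containsB kv.1 i) := by
      apply List.filter_congr
      intro i _
      exact contains_eq kv.1 i
    rw [hfc]
    simp

-- ===== VERDICT =====
theorem anton_spec : Claim_equal_anton := by
  intro d _hdom
  unfold Spec_anton anton anton_alt
  rw [foldl_nested_eq_flat antonBodyA]
  have hA := antonA_fold
    ((PySem.Dict.ofList d).items.flatMap (fun kv => kv.2.map (fun i => (kv.1, i))))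
    [] (0, PySem.Dict.empty)
    ⟨by simp, PySem.Dict.nodup_keys_empty,
     fun x => by simp [PySem.Dict.keys_empty],
     fun x => by simp [PySem.Dict.getD_empty]⟩
  rw [List.nil_append] at hA
  have hm := matched_eq (PySem.Dict.ofList d).items
  rw [hA, hm]
  exact (antonB_eq_score (antonMatched d)).symm
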